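-- pv_equiv track=rewrite | github.com/sarishtshreshth0/plag_extract | Project_CodeNet_Python800/p03104/s729268623.py | f
-- ===== SOURCE A (Python) =====
-- def f(n):
--     res = 0
--     tmp = 1
--     while tmp <= n:
--         tmp *= 2
--         num = ((n+1)//tmp)*(tmp//2)
--         num += max(0,(n+1)%tmp - tmp//2)
--         if num % 2 != 0:
--             res += (tmp//2)
--     return res
-- ===== SOURCE B (Python) =====
-- def f(n):
--     # closed form for the cumulative XOR 0 ^ 1 ^ ... ^ n (empty for n < 0)
--     if n < 0:
--         return 0
--     r = n % 4
--     if r == 0: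
--         return n
--     if r == 1:
--         return 1
--     if r == 2:
--         return n + 1
--     return 0
-- ===== Notes on version B (the rewrite author's own statement) =====
-- stated objective: simpler
-- what changed: replaced A's per-bit loop (which counts, for each binary position, how many numbers up to n have that bit set and sums the odd-count bits) by the classic constant-time closed form for the cumulative XOR of 0..n selected by n mod 4
import Mathlib
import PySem

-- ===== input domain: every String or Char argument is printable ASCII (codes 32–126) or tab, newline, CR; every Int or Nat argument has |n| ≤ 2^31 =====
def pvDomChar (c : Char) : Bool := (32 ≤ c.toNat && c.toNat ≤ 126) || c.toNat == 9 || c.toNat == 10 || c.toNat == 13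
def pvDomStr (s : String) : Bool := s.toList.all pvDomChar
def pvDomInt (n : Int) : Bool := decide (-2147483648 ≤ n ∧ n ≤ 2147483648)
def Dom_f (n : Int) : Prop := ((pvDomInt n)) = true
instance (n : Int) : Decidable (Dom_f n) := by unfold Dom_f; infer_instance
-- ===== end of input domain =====

-- B replaces A's per-bit counting loop by the closed-form (n mod 4 table) value of the cumulative XOR of 0..n.

-- ===== PORT A =====
-- num recomputed from n and the doubled tmp, exactly as the Python loop body does
def fNum (n tmp2 : Int) : Int :=
  PySem.Int.floordiv (n+1) tmp2 * PySem.Int.floordiv tmp2 2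
    + max 0 (PySem.Int.mod (n+1) tmp2 - PySem.Int.floordiv tmp2 2)

-- A's while loop; the proof argument 1 ≤ tmp only justifies termination (tmp starts
-- at 1 and doubles), it changes no computed value.
def fLoop (n res tmp : Int) (htmp : 1 ≤ tmp) : Int :=
  if _h : tmp ≤ n then
    fLoop n
      (if PySem.Int.mod (fNum n (tmp*2)) 2 ≠ 0 then res + PySem.Int.floordiv (tmp*2) 2 else res)
      (tmp*2) (by omega)
  else res
termination_by (n + 1 - tmp).toNat
decreasing_by omega

def f (n : Int) : Int := fLoop n 0 1 (by norm_num)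

-- ===== PORT B =====
def f_alt (n : Int) : Int :=
  if n < 0 then 0
  else
    let r := PySem.Int.mod n 4
    if r = 0 then n
    else if r = 1 then 1
    else if r = 2 then n + 1
    else 0

-- ===== PRECONDITION & SPEC =====
def Spec_f (n : Int) (out : Int) : Prop := out = f_alt n
instance (n : Int) (out : Int) : Decidable (Spec_f n out) := by unfold Spec_f; infer_instance

-- ===== CLAIM (what is proved, stated in full; the proofs are below) =====
def Claim_equal_f : Prop := ∀ (n : Int), Dom_f n → Spec_f n (f n)

-- ===== LEMMAS AND PROOFS =====

theorem falt_pos (n : Int) (hn : 0 ≤ n) :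
    f_alt n = if n % 4 = 0 then n else if n % 4 = 1 then 1 else if n % 4 = 2 then n + 1 else 0 := by
  unfold f_alt
  rw [PySem.Int.mod_eq_emod_of_pos (by norm_num), if_neg (by omega)]

theorem falt_nonneg (n : Int) (hn : 0 ≤ n) : 0 ≤ f_alt n := by
  rw [falt_pos n hn]; split_ifs <;> omega

theorem falt_lt (n : Int) (k : Nat) (hn : 0 ≤ n) (h : n < 2^k) : f_alt n < 2^k := by
  rw [falt_pos n hn]
  cases k with
  | zero => split_ifs <;> omega
  | succ j =>
    have h1 : (0:Int) < 2^j := by positivity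
    have h2 : (2:Int) ∣ 2^(j+1) := ⟨2^j, by ring⟩
    have h3 : (2:Int) * 2^j = 2^(j+1) := by ring
    split_ifs <;> omega

-- characterisation of Python's `/` and `%` (positive divisor) by a decomposition
theorem ediv_emod_of (a b q r : Int) (hb : 0 < b) (h : a = b*q + r) (h0 : 0 ≤ r) (h1 : r < b) :
    a / b = q ∧ a % b = r := by
  constructor
  · rw [h, show b*q + r = r + b*q by ring, Int.add_mul_ediv_left _ _ (by omega),
      Int.ediv_eq_zero_of_lt h0 h1]
    ring
  · rw [h, show b*q + r = r + b*q by ring, Int.add_mul_emod_self_left,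
      Int.emod_eq_of_lt h0 h1]

-- the crux: one loop step accounts for exactly bit k of the closed form
theorem crux (n tmp : Int) (k : Nat) (hk : tmp = 2^k) (h1 : 1 ≤ tmp) (hle : tmp ≤ n) :
    (if PySem.Int.mod (fNum n (tmp*2)) 2 ≠ 0 then tmp else 0) + (tmp*2) * (f_alt n / (tmp*2))
      = tmp * (f_alt n / tmp) := by
  have hn : 0 ≤ n := by omega
  have e1 : PySem.Int.floordiv (tmp*2) 2 = tmp := by
    rw [PySem.Int.floordiv_eq_ediv_of_pos (by norm_num)]; omega
  have e2 : PySem.Int.floordiv (n+1) (tmp*2) = (n+1) / (tmp*2) :=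
    PySem.Int.floordiv_eq_ediv_of_pos (by omega)
  have e3 : PySem.Int.mod (n+1) (tmp*2) = (n+1) % (tmp*2) :=
    PySem.Int.mod_eq_emod_of_pos (by omega)
  have e4 : ∀ x : Int, PySem.Int.mod x 2 = x % 2 := fun x =>
    PySem.Int.mod_eq_emod_of_pos (by norm_num)
  simp only [fNum, e1, e2, e3, e4]
  have hqr : (n+1) = (tmp*2) * ((n+1)/(tmp*2)) + (n+1) % (tmp*2) :=
    (Int.mul_ediv_add_emod _ _).symm
  have hr0 : 0 ≤ (n+1) % (tmp*2) := Int.emod_nonneg _ (by omega)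
  have hr1 : (n+1) % (tmp*2) < tmp*2 := Int.emod_lt_of_pos _ (by omega)
  set q := (n+1)/(tmp*2) with hq
  set r := (n+1) % (tmp*2) with hr
  cases k with
  | zero =>
    have ht : tmp = 1 := by simpa using hk
    subst ht
    rw [falt_pos n hn]
    split_ifs <;> omega
  | succ j =>
    have hs : (0:Int) < 2^j := by positivity
    set s : Int := 2^j with hsdef
    have hts : tmp = 2*s := by rw [hk, pow_succ]; ring
    have hqr' : n + 1 = 4*(s*q) + r := by rw [hts] at hqr; linear_combination hqr
    have hr1' : r < 4*s := by rw [hts] at hr1; omega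
    have hpar : (q * tmp + max 0 (r - tmp)) % 2 = (max 0 (r - tmp)) % 2 := by
      rw [hts, show q*(2*s) + max 0 (r - 2*s) = max 0 (r - 2*s) + 2*(q*s) by ring,
        Int.add_mul_emod_self_left]
    simp only [hpar]
    have h4 : n % 4 = 0 ∨ n % 4 = 1 ∨ n % 4 = 2 ∨ n % 4 = 3 := by omega
    rcases h4 with h4 | h4 | h4 | h4
    · -- G = n ; n even, r odd
      have hG : f_alt n = n := by rw [falt_pos n hn]; split_ifs <;> omega
      rw [hG]
      have hrodd : r % 2 = 1 := by omega
      have hd2 : n / (tmp*2) = q := by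
        rw [hts, show (2*s*2 : Int) = 4*s by ring]
        exact (ediv_emod_of n (4*s) q (r-1) (by omega)
          (by linear_combination hqr') (by omega) (by omega)).1
      by_cases hc : 2*s ≤ r - 1
      · have hd1 : n / tmp = 2*q+1 := by
          rw [hts]
          exact (ediv_emod_of n (2*s) (2*q+1) (r-1-2*s) (by omega)
            (by linear_combination hqr') (by omega) (by omega)).1
        rw [hd1, hd2]
        by_cases hC : max 0 (r - tmp) % 2 ≠ 0
        · rw [if_pos hC]; ring
        · exfalso; rw [hts] at hC; omega
      · have hd1 : n / tmp = 2*q := by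
          rw [hts]
          exact (ediv_emod_of n (2*s) (2*q) (r-1) (by omega)
            (by linear_combination hqr') (by omega) (by omega)).1
        rw [hd1, hd2]
        by_cases hC : max 0 (r - tmp) % 2 ≠ 0
        · exfalso; rw [hts] at hC; omega
        · rw [if_neg hC]; ring
    · -- G = 1 ; n odd, r even
      have hG : f_alt n = 1 := by rw [falt_pos n hn]; split_ifs <;> omega
      rw [hG]
      have hrev : r % 2 = 0 := by omega
      rw [Int.ediv_eq_zero_of_lt (by norm_num) (by omega : (1:Int) < tmp*2),
        Int.ediv_eq_zero_of_lt (by norm_num) (by omega : (1:Int) < tmp)]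
      by_cases hC : max 0 (r - tmp) % 2 ≠ 0
      · exfalso; rw [hts] at hC; omega
      · rw [if_neg hC]; ring
    · -- G = n+1 ; n even, r odd
      have hG : f_alt n = n + 1 := by rw [falt_pos n hn]; split_ifs <;> omega
      rw [hG]
      have hrodd : r % 2 = 1 := by omega
      have hd2 : (n+1) / (tmp*2) = q := by
        rw [hts, show (2*s*2 : Int) = 4*s by ring]
        exact (ediv_emod_of (n+1) (4*s) q r (by omega)
          (by linear_combination hqr') (by omega) (by omega)).1
      by_cases hc : 2*s ≤ r
      · have hd1 : (n+1) / tmp = 2*q+1 := by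
          rw [hts]
          exact (ediv_emod_of (n+1) (2*s) (2*q+1) (r-2*s) (by omega)
            (by linear_combination hqr') (by omega) (by omega)).1
        rw [hd1, hd2]
        by_cases hC : max 0 (r - tmp) % 2 ≠ 0
        · rw [if_pos hC]; ring
        · exfalso; rw [hts] at hC; omega
      · have hd1 : (n+1) / tmp = 2*q := by
          rw [hts]
          exact (ediv_emod_of (n+1) (2*s) (2*q) r (by omega)
            (by linear_combination hqr') (by omega) (by omega)).1
        rw [hd1, hd2]
        by_cases hC : max 0 (r - tmp) % 2 ≠ 0
        · exfalso; rw [hts] at hC; omega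
        · rw [if_neg hC]; ring
    · -- G = 0 ; n odd, r even
      have hG : f_alt n = 0 := by rw [falt_pos n hn]; split_ifs <;> omega
      rw [hG]
      have hrev : r % 2 = 0 := by omega
      rw [Int.zero_ediv, Int.zero_ediv]
      by_cases hC : max 0 (r - tmp) % 2 ≠ 0
      · exfalso; rw [hts] at hC; omega
      · rw [if_neg hC]; ring

-- loop invariant: with tmp = 2^k, the loop adds exactly the bits of f_alt n from bit k up
theorem fLoop_eq (m : Nat) : ∀ (n res tmp : Int) (htmp : 1 ≤ tmp) (k : Nat),
    0 ≤ n → tmp = 2^k → (n + 1 - tmp).toNat ≤ m →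
    fLoop n res tmp htmp = res + tmp * (f_alt n / tmp) := by
  induction m with
  | zero =>
    intro n res tmp htmp k hn hk hm
    rw [fLoop, dif_neg (by omega)]
    rw [Int.ediv_eq_zero_of_lt (falt_nonneg n hn) (by rw [hk]; exact falt_lt n k hn (by omega))]
    ring
  | succ m ih =>
    intro n res tmp htmp k hn hk hm
    by_cases hc : tmp ≤ n
    · rw [fLoop, dif_pos hc]
      rw [ih n _ (tmp*2) (by omega) (k+1) hn (by rw [hk, pow_succ]) (by omega)]
      have e1 : PySem.Int.floordiv (tmp*2) 2 = tmp := by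
        rw [PySem.Int.floordiv_eq_ediv_of_pos (by norm_num)]; omega
      rw [e1]
      have hstep := crux n tmp k hk htmp hc
      split_ifs at hstep ⊢ <;> omega
    · rw [fLoop, dif_neg hc]
      rw [Int.ediv_eq_zero_of_lt (falt_nonneg n hn) (by rw [hk]; exact falt_lt n k hn (by omega))]
      ring

-- ===== VERDICT (by name: the statement is the Claim_ definition above) =====
theorem f_spec : Claim_equal_f := by
  intro n _
  show f n = f_alt n
  unfold f
  by_cases h : n < 0
  · rw [fLoop, dif_neg (by omega)]
    unfold f_alt
    rw [if_pos h]
  · have h : 0 ≤ n := by omega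
    rw [fLoop_eq n.toNat n 0 1 (by norm_num) 0 h (by norm_num) (by omega), Int.ediv_one]
    ring
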